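-- pv_equiv track=rewrite | github.com/lorenzocarrano/coderebracket | coderebracket.py | OtherCharactersAfterBracket
-- ===== SOURCE A (Python) =====
-- def OtherCharactersAfterBracket(line):
--     lineLen = len(line)
--     bracketPos = line.rfind('{')
--     for i in range(bracketPos+1, lineLen):
--         if line[i] == ' ' or line[i] == '\t' or line[i] == '\n' or line[i] == '\r' or line[i] == '\0':
--             continue
--         else:
--             return True
--     return False
-- ===== SOURCE B (Python) =====
-- WS = {' ', '\t', '\n', '\r', '\0'}
--
-- def OtherCharactersAfterBracket(line):
--     # single reverse pass: stop at the last '{' (seen first from the right)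
--     for i in range(len(line) - 1, -1, -1):
--         ch = line[i]
--         if ch == '{':
--             return False
--         if ch not in WS:
--             return True
--     return False
-- ===== Notes on version B (the rewrite author's own statement) =====
-- stated objective: alternative
-- what changed: Replaces the rfind-then-forward-suffix-scan decomposition with a single reverse traversal that stops at the first '{' seen from the right or the first non-whitespace character, never computing the brace position.
import Mathlib
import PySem

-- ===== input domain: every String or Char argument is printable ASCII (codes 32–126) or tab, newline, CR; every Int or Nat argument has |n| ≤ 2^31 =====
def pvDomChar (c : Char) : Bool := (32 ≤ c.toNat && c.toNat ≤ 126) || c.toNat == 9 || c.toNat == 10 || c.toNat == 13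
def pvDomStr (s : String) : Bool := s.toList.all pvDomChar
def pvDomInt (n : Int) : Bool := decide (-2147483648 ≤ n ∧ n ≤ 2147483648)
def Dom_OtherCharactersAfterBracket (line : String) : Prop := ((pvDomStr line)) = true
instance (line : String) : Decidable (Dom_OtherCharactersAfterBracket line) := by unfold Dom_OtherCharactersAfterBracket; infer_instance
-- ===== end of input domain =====

-- B replaces A's rfind-then-forward-suffix-scan with a single reverse traversal (alternative decomposition, same cost).


-- the whitespace test shared by both sources: c in {' ','\t','\n','\r','\0'}
def pvIsWs (c : Char) : Bool := c = ' ' || c = '\t' || c = '\n' || c = '\r' || c = Char.ofNat 0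

-- ===== PORT A =====
-- rfind the last '{', then scan indices bracketPos+1 .. lineLen-1 forward; return True at the
-- first non-whitespace character (the early `return True` is the `any`).
def OtherCharactersAfterBracket (line : String) : Bool :=
  let lineLen : Int := PySem.Str.len line
  let bracketPos : Int := PySem.Str.rfind line "{"
  (PySem.List.pyRange (bracketPos + 1) lineLen 1).any (fun i =>
    match PySem.Str.pyGet? line i with
    | some c => ! pvIsWs c
    | none => false)   -- unreachable: i is a valid index

-- ===== PORT B =====
-- reverse pass: first '{' from the right → False; first non-whitespace → True; end → False
def pvRevScan : List Char → Bool
  | [] => false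
  | c :: rest => if c = '{' then false else if pvIsWs c then pvRevScan rest else true

def OtherCharactersAfterBracket_alt (line : String) : Bool :=
  pvRevScan line.toList.reverse

-- ===== PRECONDITION & SPEC =====
def Spec_OtherCharactersAfterBracket (line : String) (out : Bool) : Prop := out = OtherCharactersAfterBracket_alt line
instance (line : String) (out : Bool) : Decidable (Spec_OtherCharactersAfterBracket line out) := by unfold Spec_OtherCharactersAfterBracket; infer_instance

-- ===== CLAIM (what is proved, stated in full; the proofs are below) =====
def Claim_equal_OtherCharactersAfterBracket : Prop := ∀ (line : String), Dom_OtherCharactersAfterBracket line → Spec_OtherCharactersAfterBracket line (OtherCharactersAfterBracket line)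

-- ===== LEMMAS AND PROOFS =====

theorem pv_go_le (s sub : List Char) (x : Nat) : PySem.Chars.rfind.go s sub x ≤ (x : Int) := by
  induction x with
  | zero => simp [PySem.Chars.rfind.go]; split <;> simp
  | succ j ih =>
      rw [PySem.Chars.rfind.go]
      split
      · simp
      · exact le_trans ih (by exact_mod_cast Nat.le_succ j)

theorem pv_neg_one_le_go (s sub : List Char) (x : Nat) : (-1 : Int) ≤ PySem.Chars.rfind.go s sub x := by
  induction x with
  | zero => simp [PySem.Chars.rfind.go]; split <;> simp
  | succ j ih =>
      rw [PySem.Chars.rfind.go]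
      split
      · omega
      · exact ih

theorem pv_rfind_lt_length (s : List Char) : PySem.Chars.rfind s ['{'] < (s.length : Int) := by
  unfold PySem.Chars.rfind
  cases s with
  | nil => decide
  | cons x t =>
      rw [show (x :: t).length = t.length + 1 from rfl, PySem.Chars.rfind.go]
      have hd : List.drop (t.length + 1) (x :: t) = [] := by
        apply List.drop_of_length_le; simp
      rw [hd]
      have h := pv_go_le (x :: t) ['{'] t.length
      simp only [List.isPrefixOf]
      push_cast
      omega

theorem pv_neg_one_le_rfind (s sub : List Char) : (-1 : Int) ≤ PySem.Chars.rfind s sub :=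
  pv_neg_one_le_go s sub s.length

theorem pv_go_found (s : List Char) (j : Nat) (h : ['{'].isPrefixOf (List.drop j s) = true) :
    PySem.Chars.rfind.go s ['{'] j = (j : Int) := by
  cases j with
  | zero => rw [PySem.Chars.rfind.go]; simp_all
  | succ m => rw [PySem.Chars.rfind.go]; simp_all

theorem pv_any_congr {l : List Int} {f g : Int → Bool} (h : ∀ i ∈ l, f i = g i) :
    l.any f = l.any g := by
  induction l with
  | nil => rfl
  | cons a t ih =>
      simp only [List.any_cons]
      rw [h a (by simp), ih (fun i hi => h i (by simp [hi]))]

theorem pv_prefix_snoc (xs : List Char) (c : Char) (hc : c ≠ '{') :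
    ['{'].isPrefixOf (xs ++ [c]) = ['{'].isPrefixOf xs := by
  cases xs with
  | nil => simp [List.isPrefixOf]; exact fun h => hc h.symm
  | cons x t => simp [List.isPrefixOf]

theorem pv_go_snoc (ds : List Char) (c : Char) (hc : c ≠ '{') (j : Nat) (hj : j ≤ ds.length) :
    PySem.Chars.rfind.go (ds ++ [c]) ['{'] j = PySem.Chars.rfind.go ds ['{'] j := by
  induction j with
  | zero =>
      simp only [PySem.Chars.rfind.go]
      rw [pv_prefix_snoc ds c hc]
  | succ j ih =>
      rw [PySem.Chars.rfind.go, PySem.Chars.rfind.go]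
      have hd : List.drop (j+1) (ds ++ [c]) = List.drop (j+1) ds ++ [c] :=
        List.drop_append_of_le_length hj
      rw [hd, pv_prefix_snoc _ c hc, ih (Nat.le_of_succ_le hj)]

theorem pv_rfind_snoc (ds : List Char) (c : Char) :
    PySem.Chars.rfind (ds ++ [c]) ['{'] =
      if c = '{' then (ds.length : Int) else PySem.Chars.rfind ds ['{'] := by
  unfold PySem.Chars.rfind
  have hlen : (ds ++ [c]).length = ds.length + 1 := by simp
  rw [hlen, PySem.Chars.rfind.go]
  have hd : List.drop (ds.length + 1) (ds ++ [c]) = [] := by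
    apply List.drop_of_length_le; simp
  rw [hd]
  simp only [List.isPrefixOf, if_false, Bool.false_eq_true]
  by_cases hc : c = '{'
  · subst hc
    rw [if_pos rfl]
    exact pv_go_found (ds ++ ['{']) ds.length (by simp [List.drop_left', List.isPrefixOf])
  · rw [if_neg hc]
    exact pv_go_snoc ds c hc ds.length le_rfl

theorem pv_main (cs : List Char) :
    (PySem.List.pyRange (PySem.Chars.rfind cs ['{'] + 1) cs.length 1).any (fun i =>
      match PySem.Chars.pyGet? cs i with
      | some c => ! pvIsWs c
      | none => false) = pvRevScan cs.reverse := by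
  induction cs using List.reverseRecOn with
  | nil => decide
  | append_singleton ds c ih =>
      have hlen : ((ds ++ [c]).length : Int) = (ds.length : Int) + 1 := by push_cast [List.length_append, List.length_singleton]; ring
      rw [pv_rfind_snoc, hlen, List.reverse_append]
      by_cases hc : c = '{'
      · subst hc
        rw [if_pos rfl, PySem.List.pyRange_one_eq_nil (by omega)]
        simp [pvRevScan]
      · rw [if_neg hc]
        have hb1 : (-1 : Int) ≤ PySem.Chars.rfind ds ['{'] := pv_neg_one_le_rfind ds ['{']
        have hb2 : PySem.Chars.rfind ds ['{'] < (ds.length : Int) := pv_rfind_lt_length ds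
        rw [PySem.List.pyRange_one_succ_right (by omega), List.any_append]
        have hcongr : ∀ i ∈ PySem.List.pyRange (PySem.Chars.rfind ds ['{'] + 1) (ds.length : Int) 1,
            (fun i => match PySem.Chars.pyGet? (ds ++ [c]) i with
                      | some ch => ! pvIsWs ch
                      | none => false) i
            = (fun i => match PySem.Chars.pyGet? ds i with
                        | some ch => ! pvIsWs ch
                        | none => false) i := by
          intro i hi
          rw [PySem.List.mem_pyRange_one] at hi
          have h0 : 0 ≤ i := by omega
          have hlt : i.toNat < ds.length := by omega
          have hi' : i = (i.toNat : Int) := by omega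
          simp only [PySem.Chars.pyGet?]
          rw [hi', PySem.List.pyGet?_natCast, PySem.List.pyGet?_natCast,
              List.getElem?_append_left hlt]
        rw [pv_any_congr hcongr, ih]
        have hget : PySem.Chars.pyGet? (ds ++ [c]) (ds.length : Int) = some c := by
          simp [PySem.Chars.pyGet?, PySem.List.pyGet?_append_length (pre := ds) (y := c) (ys := [])]
        simp only [List.any_cons, List.any_nil, hget,
          List.reverse_singleton, List.singleton_append, pvRevScan, if_neg hc]
        cases hws : pvIsWs c <;> simp

-- ===== VERDICT (by name: the statement is the Claim_ definition above) =====
theorem OtherCharactersAfterBracket_spec : Claim_equal_OtherCharactersAfterBracket := by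
  intro line _
  unfold Spec_OtherCharactersAfterBracket OtherCharactersAfterBracket OtherCharactersAfterBracket_alt
  simpa [PySem.Str.len, PySem.Str.rfind, PySem.Str.pyGet?, PySem.Chars.len] using pv_main line.toList
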